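-- pv_equiv track=rewrite | github.com/AnandKumarRajpal/thalassemia-chatbot | actions/actions.py | get_centers
-- ===== SOURCE A (Python) =====
-- def get_centers(city=None):
--     centers = [
--         {"name": "Fatimid Foundation Karachi", "address": "Head Office 393, Britto Road, Garden East, Karachi",
--             "contact": "+92-21-2225284", "website": "https://www.fatimid.org", "city": "Karachi"},
--         {"name": "PWA Patients Welfare Association Karachi", "address": "Dr Ruth K.M. Pfau Civil Hospital Karachi",
--             "contact": "+92-21-32735214", "website": "", "city": "Karachi"},
--         {"name": "Afzaal Memorial Thalassemia Foundation", "address": "1/C Shahrah-e-Jahangir, Block 10 Gulberg Town, Karachi",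
--             "contact": "+92-21-36366452", "website": "https://afzaalfoundation.org/", "city": "Karachi"},
--         {"name": "Kashif Iqbal Thalassemia Care Center", "address": "A-19, Street 1, Mujahid Colony, Dalmia Cement Factory Road Gulshan e Iqbal, Karachi",
--             "contact": "+92-21-34981190", "website": "https://www.kashifiqbal.com/", "city": "Karachi"},
--         {"name": "National Institute of Blood Disease(NIBD)", "address": "ST 2/A Block 17 Gulshan-e-Iqbal KDA Scheme 24 Karachi",
--             "contact": "+92-21-34824250-3", "website": "https://www.nibd.edu.pk/", "city": "Karachi"},
--         {"name": "Omair Sana Foundation", "address": "R212, BLOCK 8, CORPORATE HOUSING SOCITY, SHAHRAH-E-JAHANGIR RD KARACHI",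
--                  "contact": "+92-21-36330094", "website": "http://omairsana.com/", "city": "Karachi"},
--         {"name": "Ali-Zaib Blood Transfusion Centre Faisalabad", "address": "Inside General Hospital, Ghulam Muhammad Abad, Faisalabad",
--             "contact": "+92-41-8722090", "website": "https://www.alizaibfoundation.org", "city": "Faisalabad"},
--         {"name": "Fatimid Foundation Hyderabad Centre", "address": "Red Cresent B meeran Shah Road Near Dialdas Club Hyderabad",
--             "contact": "+92-22-2728241", "website": "", "city": "Hyderabad"},
--         {"name": "Pakistan Thalassemia Center Islamabad", "address": "F-9 Park, Islamabad",
--             "contact": "+92-51-2324241", "website": "", "city": "Islamabad"},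
--         {"name": "Ali-Zaib Blood Transfusion Centre Faisalabad", "address": "G-8 Markaz, Islamabad",
--             "contact": "+92-310-0002273", "website": "http://www.pims.gov.pk/", "city": "Islamabad"},
--         {"name": "Fatimid Foundation Lahore Center", "address": "72-A, Blok D-II, Johar Town, Lahore",
--             "contact": "+92-42-35210834-6", "website": "https://www.fatimid.org", "city": "Lahore"},
--         {"name": "Thalassaemia Center, Safe Blood Bank & Hematological Services Multan", "address": "1967 Aqsa Street HazoorBagh Road, Multan",
--             "contact": "+92-300-6301473", "website": "", "city": "Multan"},
--         {"name": "Ahsas Welfare Organization Peshawar", "address": "House# 1653 Mohalla Mulan Majeed, 1/S Hushtnagri Peshawar City",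
--             "contact": "+92-91-2565094", "website": "", "city": "Peshawar"},
--         {"name": "Hepatitis & Thalassemi Care Organization", "address": "Bugti Bazar Rd, Sui, Dera Bugti, Balochistan",
--             "contact": "+92-835-421095", "website": "", "city": "Dera Bugti"},
--         {"name": "Sukkur Blood Bank & Hospital SBDDS", "address": "Eidgah Road, Near DIG Office, Sukkur",
--                  "contact": "+92-71-5615375", "website": "", "city": "Sukkur"},
--         {"name": "CMH Combined Military Hospital", "address": "CMH Rd, Rawalpindi",
--                  "contact": "+92-51-9273426", "website": "", "city": "Rawalpindi"},
--         {"name": "Thalassaemia Care Center BMCH Quetta", "address": "Bolan Medical Complex Hospital, Quetta",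
--                  "contact": "", "website": "https://www.facebook.com/Thalassaemia-Care-Center-BMCH-Quetta-1478540029045683/", "city": "Quetta"},
--
--
--     ]
--     if city:
--         return [
--             center for center in centers if center["city"].lower() == city.lower()
--         ], "Here are some of the available centers in {}:".format(city)
--     else:
--         return [], "No available centers found in {}:".format(city)
-- ===== SOURCE B (Python) =====
-- # Centers stored once as compact value tuples; a module-level pass groups them
-- # (already as dicts) by lowercased city, so a call is one dict lookup, no scan.
-- FIELDS = ("name", "address", "contact", "website", "city")
--
-- ROWS = [
--     ("Fatimid Foundation Karachi", "Head Office 393, Britto Road, Garden East, Karachi", "+92-21-2225284", "https://www.fatimid.org", "Karachi"),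
--     ("PWA Patients Welfare Association Karachi", "Dr Ruth K.M. Pfau Civil Hospital Karachi", "+92-21-32735214", "", "Karachi"),
--     ("Afzaal Memorial Thalassemia Foundation", "1/C Shahrah-e-Jahangir, Block 10 Gulberg Town, Karachi", "+92-21-36366452", "https://afzaalfoundation.org/", "Karachi"),
--     ("Kashif Iqbal Thalassemia Care Center", "A-19, Street 1, Mujahid Colony, Dalmia Cement Factory Road Gulshan e Iqbal, Karachi", "+92-21-34981190", "https://www.kashifiqbal.com/", "Karachi"),
--     ("National Institute of Blood Disease(NIBD)", "ST 2/A Block 17 Gulshan-e-Iqbal KDA Scheme 24 Karachi", "+92-21-34824250-3", "https://www.nibd.edu.pk/", "Karachi"),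
--     ("Omair Sana Foundation", "R212, BLOCK 8, CORPORATE HOUSING SOCITY, SHAHRAH-E-JAHANGIR RD KARACHI", "+92-21-36330094", "http://omairsana.com/", "Karachi"),
--     ("Ali-Zaib Blood Transfusion Centre Faisalabad", "Inside General Hospital, Ghulam Muhammad Abad, Faisalabad", "+92-41-8722090", "https://www.alizaibfoundation.org", "Faisalabad"),
--     ("Fatimid Foundation Hyderabad Centre", "Red Cresent B meeran Shah Road Near Dialdas Club Hyderabad", "+92-22-2728241", "", "Hyderabad"),
--     ("Pakistan Thalassemia Center Islamabad", "F-9 Park, Islamabad", "+92-51-2324241", "", "Islamabad"),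
--     ("Ali-Zaib Blood Transfusion Centre Faisalabad", "G-8 Markaz, Islamabad", "+92-310-0002273", "http://www.pims.gov.pk/", "Islamabad"),
--     ("Fatimid Foundation Lahore Center", "72-A, Blok D-II, Johar Town, Lahore", "+92-42-35210834-6", "https://www.fatimid.org", "Lahore"),
--     ("Thalassaemia Center, Safe Blood Bank & Hematological Services Multan", "1967 Aqsa Street HazoorBagh Road, Multan", "+92-300-6301473", "", "Multan"),
--     ("Ahsas Welfare Organization Peshawar", "House# 1653 Mohalla Mulan Majeed, 1/S Hushtnagri Peshawar City", "+92-91-2565094", "", "Peshawar"),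
--     ("Hepatitis & Thalassemi Care Organization", "Bugti Bazar Rd, Sui, Dera Bugti, Balochistan", "+92-835-421095", "", "Dera Bugti"),
--     ("Sukkur Blood Bank & Hospital SBDDS", "Eidgah Road, Near DIG Office, Sukkur", "+92-71-5615375", "", "Sukkur"),
--     ("CMH Combined Military Hospital", "CMH Rd, Rawalpindi", "+92-51-9273426", "", "Rawalpindi"),
--     ("Thalassaemia Care Center BMCH Quetta", "Bolan Medical Complex Hospital, Quetta", "", "https://www.facebook.com/Thalassaemia-Care-Center-BMCH-Quetta-1478540029045683/", "Quetta"),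
-- ]
--
-- CENTERS_BY_CITY = {}
-- for _row in ROWS:
--     CENTERS_BY_CITY.setdefault(_row[4].lower(), []).append(dict(zip(FIELDS, _row)))
--
--
-- def get_centers(city=None):
--     if not city:
--         return [], "No available centers found in {}:".format(city)
--     return CENTERS_BY_CITY.get(city.lower(), []), "Here are some of the available centers in {}:".format(city)
-- ===== Notes on version B (the rewrite author's own statement) =====
-- stated objective: idiomatic
-- what changed: A rebuilds a list of dicts and scans/filters it on every call; B stores the data once as compact value tuples, groups them at module level into a dict keyed by lowercased city (building each center dict via dict(zip(FIELDS, row))), and each call is a single dict lookup with an early return for a falsy city.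
import Mathlib
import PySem

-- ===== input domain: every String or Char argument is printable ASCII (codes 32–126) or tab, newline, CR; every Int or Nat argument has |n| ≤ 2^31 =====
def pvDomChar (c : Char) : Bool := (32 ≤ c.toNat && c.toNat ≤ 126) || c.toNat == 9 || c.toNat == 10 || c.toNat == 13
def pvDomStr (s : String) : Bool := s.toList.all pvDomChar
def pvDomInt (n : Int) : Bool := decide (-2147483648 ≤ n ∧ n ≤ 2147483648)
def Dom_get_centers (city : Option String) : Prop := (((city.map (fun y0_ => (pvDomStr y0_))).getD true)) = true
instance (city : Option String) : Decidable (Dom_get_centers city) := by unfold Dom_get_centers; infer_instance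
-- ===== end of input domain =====

-- B stores the centers as compact value tuples and groups them once into a dict keyed by
-- lowercased city, so each call is a lookup, not a scan; idiomatic, same return values.
-- ===== PORT A =====
-- A's `centers` list literal: a list of dicts (association lists, insertion order)
def pvCenters : List (List (String × String)) := [
  [("name", "Fatimid Foundation Karachi"), ("address", "Head Office 393, Britto Road, Garden East, Karachi"), ("contact", "+92-21-2225284"), ("website", "https://www.fatimid.org"), ("city", "Karachi")],
  [("name", "PWA Patients Welfare Association Karachi"), ("address", "Dr Ruth K.M. Pfau Civil Hospital Karachi"), ("contact", "+92-21-32735214"), ("website", ""), ("city", "Karachi")],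
  [("name", "Afzaal Memorial Thalassemia Foundation"), ("address", "1/C Shahrah-e-Jahangir, Block 10 Gulberg Town, Karachi"), ("contact", "+92-21-36366452"), ("website", "https://afzaalfoundation.org/"), ("city", "Karachi")],
  [("name", "Kashif Iqbal Thalassemia Care Center"), ("address", "A-19, Street 1, Mujahid Colony, Dalmia Cement Factory Road Gulshan e Iqbal, Karachi"), ("contact", "+92-21-34981190"), ("website", "https://www.kashifiqbal.com/"), ("city", "Karachi")],
  [("name", "National Institute of Blood Disease(NIBD)"), ("address", "ST 2/A Block 17 Gulshan-e-Iqbal KDA Scheme 24 Karachi"), ("contact", "+92-21-34824250-3"), ("website", "https://www.nibd.edu.pk/"), ("city", "Karachi")],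
  [("name", "Omair Sana Foundation"), ("address", "R212, BLOCK 8, CORPORATE HOUSING SOCITY, SHAHRAH-E-JAHANGIR RD KARACHI"), ("contact", "+92-21-36330094"), ("website", "http://omairsana.com/"), ("city", "Karachi")],
  [("name", "Ali-Zaib Blood Transfusion Centre Faisalabad"), ("address", "Inside General Hospital, Ghulam Muhammad Abad, Faisalabad"), ("contact", "+92-41-8722090"), ("website", "https://www.alizaibfoundation.org"), ("city", "Faisalabad")],
  [("name", "Fatimid Foundation Hyderabad Centre"), ("address", "Red Cresent B meeran Shah Road Near Dialdas Club Hyderabad"), ("contact", "+92-22-2728241"), ("website", ""), ("city", "Hyderabad")],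
  [("name", "Pakistan Thalassemia Center Islamabad"), ("address", "F-9 Park, Islamabad"), ("contact", "+92-51-2324241"), ("website", ""), ("city", "Islamabad")],
  [("name", "Ali-Zaib Blood Transfusion Centre Faisalabad"), ("address", "G-8 Markaz, Islamabad"), ("contact", "+92-310-0002273"), ("website", "http://www.pims.gov.pk/"), ("city", "Islamabad")],
  [("name", "Fatimid Foundation Lahore Center"), ("address", "72-A, Blok D-II, Johar Town, Lahore"), ("contact", "+92-42-35210834-6"), ("website", "https://www.fatimid.org"), ("city", "Lahore")],
  [("name", "Thalassaemia Center, Safe Blood Bank & Hematological Services Multan"), ("address", "1967 Aqsa Street HazoorBagh Road, Multan"), ("contact", "+92-300-6301473"), ("website", ""), ("city", "Multan")],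
  [("name", "Ahsas Welfare Organization Peshawar"), ("address", "House# 1653 Mohalla Mulan Majeed, 1/S Hushtnagri Peshawar City"), ("contact", "+92-91-2565094"), ("website", ""), ("city", "Peshawar")],
  [("name", "Hepatitis & Thalassemi Care Organization"), ("address", "Bugti Bazar Rd, Sui, Dera Bugti, Balochistan"), ("contact", "+92-835-421095"), ("website", ""), ("city", "Dera Bugti")],
  [("name", "Sukkur Blood Bank & Hospital SBDDS"), ("address", "Eidgah Road, Near DIG Office, Sukkur"), ("contact", "+92-71-5615375"), ("website", ""), ("city", "Sukkur")],
  [("name", "CMH Combined Military Hospital"), ("address", "CMH Rd, Rawalpindi"), ("contact", "+92-51-9273426"), ("website", ""), ("city", "Rawalpindi")],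
  [("name", "Thalassaemia Care Center BMCH Quetta"), ("address", "Bolan Medical Complex Hospital, Quetta"), ("contact", ""), ("website", "https://www.facebook.com/Thalassaemia-Care-Center-BMCH-Quetta-1478540029045683/"), ("city", "Quetta")]]

-- dict lookup c["city"] (keys of every center literal are unique and present)
def pvGet (c : List (String × String)) (k : String) : String :=
  ((c.find? (fun p => p.1 == k)).getD ("", "")).2

def get_centers (city : Option String) : (List (List (String × String))) × String :=
  let centers := pvCenters
  match city with
  | some s =>
    if s = "" then ([], "No available centers found in :")
    else
      (centers.filter (fun c => PySem.Str.lower (pvGet c "city") == PySem.Str.lower s),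
       "Here are some of the available centers in " ++ s ++ ":")
  | none => ([], "No available centers found in None:")

-- ===== PORT B =====
-- B's ROWS: value tuples (name, address, contact, website, city)
def pvRow (n a c w ci : String) : String × String × String × String × String := (n, a, c, w, ci)

def pvRows : List (String × String × String × String × String) := [
  pvRow "Fatimid Foundation Karachi" "Head Office 393, Britto Road, Garden East, Karachi" "+92-21-2225284" "https://www.fatimid.org" "Karachi",
  pvRow "PWA Patients Welfare Association Karachi" "Dr Ruth K.M. Pfau Civil Hospital Karachi" "+92-21-32735214" "" "Karachi",
  pvRow "Afzaal Memorial Thalassemia Foundation" "1/C Shahrah-e-Jahangir, Block 10 Gulberg Town, Karachi" "+92-21-36366452" "https://afzaalfoundation.org/" "Karachi",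
  pvRow "Kashif Iqbal Thalassemia Care Center" "A-19, Street 1, Mujahid Colony, Dalmia Cement Factory Road Gulshan e Iqbal, Karachi" "+92-21-34981190" "https://www.kashifiqbal.com/" "Karachi",
  pvRow "National Institute of Blood Disease(NIBD)" "ST 2/A Block 17 Gulshan-e-Iqbal KDA Scheme 24 Karachi" "+92-21-34824250-3" "https://www.nibd.edu.pk/" "Karachi",
  pvRow "Omair Sana Foundation" "R212, BLOCK 8, CORPORATE HOUSING SOCITY, SHAHRAH-E-JAHANGIR RD KARACHI" "+92-21-36330094" "http://omairsana.com/" "Karachi",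
  pvRow "Ali-Zaib Blood Transfusion Centre Faisalabad" "Inside General Hospital, Ghulam Muhammad Abad, Faisalabad" "+92-41-8722090" "https://www.alizaibfoundation.org" "Faisalabad",
  pvRow "Fatimid Foundation Hyderabad Centre" "Red Cresent B meeran Shah Road Near Dialdas Club Hyderabad" "+92-22-2728241" "" "Hyderabad",
  pvRow "Pakistan Thalassemia Center Islamabad" "F-9 Park, Islamabad" "+92-51-2324241" "" "Islamabad",
  pvRow "Ali-Zaib Blood Transfusion Centre Faisalabad" "G-8 Markaz, Islamabad" "+92-310-0002273" "http://www.pims.gov.pk/" "Islamabad",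
  pvRow "Fatimid Foundation Lahore Center" "72-A, Blok D-II, Johar Town, Lahore" "+92-42-35210834-6" "https://www.fatimid.org" "Lahore",
  pvRow "Thalassaemia Center, Safe Blood Bank & Hematological Services Multan" "1967 Aqsa Street HazoorBagh Road, Multan" "+92-300-6301473" "" "Multan",
  pvRow "Ahsas Welfare Organization Peshawar" "House# 1653 Mohalla Mulan Majeed, 1/S Hushtnagri Peshawar City" "+92-91-2565094" "" "Peshawar",
  pvRow "Hepatitis & Thalassemi Care Organization" "Bugti Bazar Rd, Sui, Dera Bugti, Balochistan" "+92-835-421095" "" "Dera Bugti",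
  pvRow "Sukkur Blood Bank & Hospital SBDDS" "Eidgah Road, Near DIG Office, Sukkur" "+92-71-5615375" "" "Sukkur",
  pvRow "CMH Combined Military Hospital" "CMH Rd, Rawalpindi" "+92-51-9273426" "" "Rawalpindi",
  pvRow "Thalassaemia Care Center BMCH Quetta" "Bolan Medical Complex Hospital, Quetta" "" "https://www.facebook.com/Thalassaemia-Care-Center-BMCH-Quetta-1478540029045683/" "Quetta"]

-- FIELDS, and dict(zip(FIELDS, row)) (five distinct keys: the zip list IS the dict)
def pvFields : List String := ["name", "address", "contact", "website", "city"]

def pvMkCenter (r : String × String × String × String × String) : List (String × String) :=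
  pvFields.zip [r.1, r.2.1, r.2.2.1, r.2.2.2.1, r.2.2.2.2]

-- module-level grouping pass: CENTERS_BY_CITY.setdefault(row[4].lower(), []).append(dict(zip(FIELDS, row)))
def pvIndex : PySem.Dict String (List (List (String × String))) :=
  pvRows.foldl
    (fun d r => d.modify (PySem.Str.lower r.2.2.2.2) [] (fun l => l ++ [pvMkCenter r]))
    PySem.Dict.empty

def get_centers_alt (city : Option String) : (List (List (String × String))) × String :=
  -- `if not city:` — true exactly for None and ""
  if (city.getD "") = "" then
    ([], "No available centers found in " ++ (match city with | none => "None" | some s => s) ++ ":")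
  else
    (pvIndex.getD (PySem.Str.lower (city.getD "")) [],
     "Here are some of the available centers in " ++ city.getD "" ++ ":")

-- ===== PRECONDITION & SPEC =====
def Spec_get_centers (city : Option String) (out : (List (List (String × String))) × String) : Prop := out = get_centers_alt city
instance (city : Option String) (out : (List (List (String × String))) × String) : Decidable (Spec_get_centers city out) := by unfold Spec_get_centers; infer_instance

-- ===== CLAIM (what is proved, stated in full; the proofs are below) =====
def Claim_equal_get_centers : Prop := ∀ (city : Option String), Dom_get_centers city → Spec_get_centers city (get_centers city)

-- ===== LEMMAS AND PROOFS =====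
-- A's dicts are exactly B's rows turned into dicts
theorem pvCenters_eq : pvCenters = pvRows.map pvMkCenter := by decide

-- looking up "city" in a built dict returns the row's city component
theorem pvGet_mk (r : String × String × String × String × String) :
    pvGet (pvMkCenter r) "city" = r.2.2.2.2 := rfl

-- B's grouped index, looked up at any key k, is exactly A's filter of the source list
theorem pvIndex_getD (k : String) :
    pvIndex.getD k [] = pvCenters.filter (fun c => PySem.Str.lower (pvGet c "city") == k) := by
  unfold pvIndex
  have h := List.foldl_map
    (f := fun r : String × String × String × String × String =>
      (PySem.Str.lower r.2.2.2.2, pvMkCenter r))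
    (g := fun (d : PySem.Dict String (List (List (String × String)))) p =>
      d.modify p.1 [] (fun l => l ++ [p.2]))
    (l := pvRows) (init := PySem.Dict.empty)
  beta_reduce at h
  rw [← h, PySem.Dict.getD_foldl_modify_append, pvCenters_eq]
  simp [List.filter_map, Function.comp_def, pvGet_mk]

-- ===== VERDICT (by name: the statement is the Claim_ definition above) =====
theorem get_centers_spec : Claim_equal_get_centers := by
  intro city _
  unfold Spec_get_centers get_centers get_centers_alt
  match city with
  | none => rfl
  | some s =>
    by_cases hs : s = "" <;> simp [hs, pvIndex_getD]
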